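-- pv_equiv track=rewrite | github.com/SUBHASH-S-M/Python_Practice | matrix_max_checking.py | secon_diag
-- ===== SOURCE A (Python) =====
-- def secon_diag(mat1):
--     temp=[]
--     small=[100000]
--     for  i in range(0,len(mat1)):
--         temp.append(mat1[i][len(mat1)-i-1])
--
--     set1=list(set(temp))
--     for i in set1:
--         if(temp.count(i)>=4):
--             small.append(i)
--     return(min(small))
-- ===== SOURCE B (Python) =====
-- def secon_diag(mat1):
--     n = len(mat1)
--     s = sorted(mat1[i][n - i - 1] for i in range(n))
--     best = 100000
--     for x, y in zip(s, s[3:]):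
--         if x == y and x < best:
--             best = x
--     return best
-- ===== Notes on version B (the rewrite author's own statement) =====
-- stated objective: alternative
-- what changed: Replaces the distinct-set + repeated list.count scans with sorting the anti-diagonal and one pass over a 3-apart sliding window (s[i]==s[i+3] in a sorted list iff the value occurs >=4 times), keeping a running min seeded with 100000.
import Mathlib
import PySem

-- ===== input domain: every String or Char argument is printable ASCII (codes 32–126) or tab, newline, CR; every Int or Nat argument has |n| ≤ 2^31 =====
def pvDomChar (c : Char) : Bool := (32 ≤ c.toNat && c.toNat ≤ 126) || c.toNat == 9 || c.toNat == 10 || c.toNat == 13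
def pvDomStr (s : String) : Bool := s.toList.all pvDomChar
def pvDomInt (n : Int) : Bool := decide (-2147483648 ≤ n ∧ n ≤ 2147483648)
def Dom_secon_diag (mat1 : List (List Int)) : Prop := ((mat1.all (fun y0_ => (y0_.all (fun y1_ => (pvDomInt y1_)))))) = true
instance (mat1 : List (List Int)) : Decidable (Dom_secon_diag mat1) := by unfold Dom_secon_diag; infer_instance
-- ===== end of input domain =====

-- B replaces A's distinct-set + repeated list.count scans by sorting the anti-diagonal and
-- scanning a 3-apart sliding window (s[i] == s[i+3] in a sorted list iff the value occurs ≥ 4 times).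

-- ===== PORT A =====
def secon_diag (mat1 : List (List Int)) : Int :=
  let n : Int := (mat1.length : Int)
  let temp : List Int := (PySem.List.pyRange 0 n 1).foldl
    (fun acc i => acc ++ [PySem.List.pyGetD (PySem.List.pyGetD mat1 i []) (n - i - 1) 0]) []
  let set1 : List Int := PySem.Set.ofList temp
  let small : List Int := set1.foldl
    (fun acc i => if temp.count i ≥ 4 then acc ++ [i] else acc) [100000]
  (PySem.List.min? small (fun x => x)).getD 0

-- ===== PORT B =====
def secon_diag_alt (mat1 : List (List Int)) : Int :=
  let n : Int := (mat1.length : Int)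
  let s : List Int := PySem.List.sorted
    ((PySem.List.pyRange 0 n 1).map
      (fun i => PySem.List.pyGetD (PySem.List.pyGetD mat1 i []) (n - i - 1) 0))
    (fun x => x) false
  (s.zip (s.drop 3)).foldl
    (fun best p => if p.1 = p.2 ∧ p.1 < best then p.1 else best) 100000

-- ===== PRECONDITION & SPEC =====
-- Pre_: each row i must be long enough for the anti-diagonal index n-i-1; otherwise Python's mat1[i][...] raises IndexError.
def Pre_secon_diag (mat1 : List (List Int)) : Prop :=
  ∀ i < mat1.length, mat1.length - i - 1 < (mat1.getD i []).length
instance (mat1 : List (List Int)) : Decidable (Pre_secon_diag mat1) := by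
  unfold Pre_secon_diag; infer_instance

def pvWitness_secon_diag : List (List Int) := [[1, 2], [1, 4]]

def Spec_secon_diag (mat1 : List (List Int)) (out : Int) : Prop := out = secon_diag_alt mat1
instance (mat1 : List (List Int)) (out : Int) : Decidable (Spec_secon_diag mat1 out) := by unfold Spec_secon_diag; infer_instance

-- ===== CLAIM (what is proved, stated in full; the proofs are below) =====
def Claim_equal_secon_diag : Prop := ∀ (mat1 : List (List Int)), Dom_secon_diag mat1 → Pre_secon_diag mat1 → Spec_secon_diag mat1 (secon_diag mat1)

-- ===== LEMMAS AND PROOFS =====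

/-- B's running-min window loop = foldl min over the first components of the equal pairs. -/
lemma runmin_pairs (L : List (Int × Int)) (a : Int) :
    L.foldl (fun best p => if p.1 = p.2 ∧ p.1 < best then p.1 else best) a
      = ((L.filter (fun p => p.1 == p.2)).map Prod.fst).foldl min a := by
  induction L generalizing a with
  | nil => rfl
  | cons p t ih =>
    obtain ⟨u, v⟩ := p
    by_cases h : u = v
    · subst h
      simp only [List.foldl_cons, List.filter_cons, beq_self_eq_true, if_pos, List.map_cons, true_and]
      rw [ih]
      congr 1
      rw [min_def]
      split_ifs <;> omega
    · have hb : ((u, v).1 == (u, v).2) = false := by simpa using h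
      simp only [List.foldl_cons, List.filter_cons, hb, Bool.false_eq_true, if_false]
      rw [if_neg (by simp [h])]
      exact ih a

lemma fmin_le_init (l : List Int) (a : Int) : l.foldl min a ≤ a := by
  induction l generalizing a with
  | nil => simp
  | cons x t ih => exact le_trans (ih (min a x)) (min_le_left a x)

lemma fmin_le_mem (l : List Int) (a x : Int) : x ∈ l → l.foldl min a ≤ x := by
  induction l generalizing a with
  | nil => intro hx; cases hx
  | cons y t ih =>
    intro hx
    rcases List.mem_cons.mp hx with rfl | h
    · exact le_trans (fmin_le_init t (min a x)) (min_le_right a x)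
    · exact ih (min a y) h

lemma fmin_mem (l : List Int) (a : Int) : l.foldl min a = a ∨ l.foldl min a ∈ l := by
  induction l generalizing a with
  | nil => left; rfl
  | cons x t ih =>
    rcases ih (min a x) with h | h
    · rw [List.foldl_cons, h, min_def]
      split_ifs with hax
      · left; rfl
      · right; exact List.mem_cons_self
    · right; exact List.mem_cons_of_mem _ h

lemma fmin_congr_mem (l₁ l₂ : List Int) (a : Int) (h : ∀ x, x ∈ l₁ ↔ x ∈ l₂) :
    l₁.foldl min a = l₂.foldl min a := by
  apply le_antisymm
  · rcases fmin_mem l₂ a with h2 | h2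
    · rw [h2]; exact fmin_le_init l₁ a
    · exact fmin_le_mem l₁ a _ ((h _).mpr h2)
  · rcases fmin_mem l₁ a with h1 | h1
    · rw [h1]; exact fmin_le_init l₂ a
    · exact fmin_le_mem l₂ a _ ((h _).mp h1)

/-- In a ≤-sorted list whose elements all dominate x, the first k positions are x
whenever x occurs at least k times. -/
lemma take_all (x : Int) : ∀ (s : List Int) (k j : Nat), s.Pairwise (· ≤ ·) →
    (∀ y ∈ s, x ≤ y) → k ≤ s.count x → j < k → s[j]? = some x := by
  intro s
  induction s with
  | nil => intro k j _ _ hk hj; simp at hk; omega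
  | cons h t ih =>
    intro k j hp hlo hk hj
    have hx : x ∈ h :: t := by
      apply List.count_pos_iff.mp
      have : 0 < k := Nat.lt_of_le_of_lt (Nat.zero_le j) hj
      omega
    have hhx : h = x := by
      have h1 : x ≤ h := hlo h List.mem_cons_self
      have h2 : h ≤ x := by
        rcases List.mem_cons.mp hx with rfl | hxt
        · exact le_refl _
        · exact (List.pairwise_cons.mp hp).1 x hxt
      omega
    cases j with
    | zero => simp [hhx]
    | succ j' =>
      rw [List.getElem?_cons_succ]
      have hcnt : k - 1 ≤ t.count x := by
        rw [hhx, List.count_cons_self] at hk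
        omega
      exact ih (k - 1) j' (List.pairwise_cons.mp hp).2
        (fun y hy => hlo y (List.mem_cons_of_mem _ hy)) hcnt (by omega)

/-- Forward: in a sorted list, count ≥ 4 yields an index with s[i] = s[i+3] = x. -/
lemma count_four_window (x : Int) : ∀ (s : List Int), s.Pairwise (· ≤ ·) →
    4 ≤ s.count x → ∃ i : Nat, s[i]? = some x ∧ s[i + 3]? = some x := by
  intro s
  induction s with
  | nil => intro _ hk; simp at hk
  | cons h t ih =>
    intro hp hk
    by_cases hhx : h = x
    · refine ⟨0, ?_, ?_⟩
      · simp [hhx]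
      · have hlo : ∀ y ∈ h :: t, x ≤ y := by
          intro y hy
          rcases List.mem_cons.mp hy with rfl | hyt
          · omega
          · have := (List.pairwise_cons.mp hp).1 y hyt; omega
        exact take_all x (h :: t) 4 3 hp hlo hk (by omega)
    · have hct : 4 ≤ t.count x := by
        rw [List.count_cons] at hk
        simp [hhx] at hk
        omega
      obtain ⟨i, h1, h2⟩ := ih (List.pairwise_cons.mp hp).2 hct
      exact ⟨i + 1, by simpa using h1, by simpa using h2⟩

/-- Reverse: s[i] = s[i+3] = x in a sorted list gives count ≥ 4. -/
lemma window_count_four (x : Int) (s : List Int) (hp : s.Pairwise (· ≤ ·))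
    (i : Nat) (h1 : s[i]? = some x) (h2 : s[i + 3]? = some x) : 4 ≤ s.count x := by
  have hlen : i + 3 < s.length := by
    have := List.getElem?_eq_some_iff.mp h2
    exact this.1
  have hmono := List.pairwise_iff_getElem.mp hp
  have hgi : s[i]'(by omega) = x := by
    have := List.getElem?_eq_some_iff.mp h1
    obtain ⟨_, hv⟩ := this; simpa using hv
  have hgi3 : s[i + 3]'hlen = x := by
    have := List.getElem?_eq_some_iff.mp h2
    obtain ⟨_, hv⟩ := this; simpa using hv
  have hall : ∀ k : Nat, (hk : k ≤ 3) → s[i + k]'(by omega) = x := by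
    intro k hk
    rcases Nat.eq_or_lt_of_le (Nat.zero_le k) with h0 | h0
    · simpa [← h0] using hgi
    rcases Nat.eq_or_lt_of_le hk with h3 | h3
    · simpa [h3] using hgi3
    have hle1 : s[i]'(by omega) ≤ s[i + k]'(by omega) := by
      apply hmono; omega
    have hle2 : s[i + k]'(by omega) ≤ s[i + 3]'hlen := by
      apply hmono; omega
    omega
  have hsub : List.Sublist ((s.drop i).take 4) s :=
    List.Sublist.trans (List.take_sublist ..) (List.drop_sublist ..)
  have htake : (s.drop i).take 4 = List.replicate 4 x := by
    apply List.ext_getElem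
    · rw [List.length_take, List.length_drop, List.length_replicate]; omega
    · intro j hj hj'
      rw [List.getElem_take, List.getElem_drop]
      rw [List.length_replicate] at hj'
      rw [List.getElem_replicate]
      exact hall j (by omega)
  have := hsub.count_le x
  rw [htake] at this
  simp at this
  omega

/-- Membership in B's window list ↔ count in the sorted list ≥ 4. -/
lemma mem_window_iff (s : List Int) (hp : s.Pairwise (· ≤ ·)) (x : Int) :
    (x ∈ ((s.zip (s.drop 3)).filter (fun p => p.1 == p.2)).map Prod.fst) ↔ 4 ≤ s.count x := by
  constructor
  · intro hx
    obtain ⟨p, hpmem, hfst⟩ := List.mem_map.mp hx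
    have := List.mem_filter.mp hpmem
    obtain ⟨hz, heq⟩ := this
    have hpe : p.1 = p.2 := by simpa using heq
    obtain ⟨i, hi⟩ := List.mem_iff_getElem?.mp hz
    have hzi := hi
    rw [List.getElem?_zip_eq_some] at hzi
    obtain ⟨ha, hb⟩ := hzi
    rw [List.getElem?_drop] at hb
    subst hfst
    exact window_count_four p.1 s hp i ha (by rw [Nat.add_comm 3 i] at hb; rw [← hpe] at hb; exact hb)
  · intro hc
    obtain ⟨i, h1, h2⟩ := count_four_window x s hp hc
    apply List.mem_map.mpr
    refine ⟨(x, x), ?_, rfl⟩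
    apply List.mem_filter.mpr
    refine ⟨?_, by simp⟩
    apply List.mem_iff_getElem?.mpr
    refine ⟨i, ?_⟩
    rw [List.getElem?_zip_eq_some]
    exact ⟨h1, by rw [List.getElem?_drop, Nat.add_comm]; exact h2⟩

-- ===== VERDICT (by name: the statement is the Claim_ definition above) =====
theorem secon_diag_spec : Claim_equal_secon_diag := by
  intro mat1 _ _
  unfold Spec_secon_diag
  simp only [secon_diag, secon_diag_alt]
  set n : Int := (mat1.length : Int) with hn
  set f : Int → Int := fun i =>
    PySem.List.pyGetD (PySem.List.pyGetD mat1 i []) (n - i - 1) 0 with hf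
  have hT : (PySem.List.pyRange 0 n 1).foldl
      (fun acc i => acc ++ [PySem.List.pyGetD (PySem.List.pyGetD mat1 i []) (n - i - 1) 0]) []
      = ((PySem.List.pyRange 0 n 1).map f) := by
    simpa using PySem.List.foldl_append_singleton_eq_map (l := PySem.List.pyRange 0 n 1)
      (f := f) (acc := [])
  set T : List Int := (PySem.List.pyRange 0 n 1).map f with hTdef
  rw [hT]
  -- A's side: small = 100000 :: filtered distinct values, min = foldl min
  have hsmall : (PySem.Set.ofList T).foldl
      (fun acc i => if T.count i ≥ 4 then acc ++ [i] else acc) [100000]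
      = [100000] ++ (PySem.Set.ofList T).filter (fun v => decide (T.count v ≥ 4)) := by
    exact PySem.List.foldl_append_ite_eq_filter (p := fun i => T.count i ≥ 4)
      (l := PySem.Set.ofList T) (acc := [100000])
  rw [hsmall, List.singleton_append, PySem.List.min?_id_cons]
  simp only [Option.getD_some]
  -- B's side
  set s : List Int := PySem.List.sorted T (fun x => x) false with hs
  rw [runmin_pairs]
  have hsp : s.Pairwise (· ≤ ·) := by
    simpa using PySem.List.sorted_pairwise (xs := T) (key := fun x => x)
  have hperm : s.Perm T := PySem.List.sorted_perm (xs := T) (key := fun x => x) (rev := false)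
  apply Eq.symm
  apply fmin_congr_mem
  intro x
  rw [mem_window_iff s hsp x, List.mem_filter]
  rw [hperm.count_eq]
  constructor
  · intro hc
    refine ⟨?_, by simpa using hc⟩
    exact (PySem.Set.mem_ofList _ _).mpr (List.count_pos_iff.mp (by omega))
  · intro hx
    simpa using hx.2
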